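-- pv_equiv track=rewrite | github.com/Qasem-h/mmo-game-validator | i18naddress/__init__.py | _compact_choices
-- ===== SOURCE A (Python) =====
-- from collections import OrderedDict
--
-- def _compact_choices(choices):
--     value_map = OrderedDict()
--     for key, value in choices:
--         if not key in value_map:
--             value_map[key] = set()
--         value_map[key].add(value)
--     return [
--         (key, value) for key, values in value_map.items() for value in sorted(values)
--     ]
-- ===== SOURCE B (Python) =====
-- def _compact_choices(choices):
--     if not choices:
--         return []
--     key = choices[0][0]
--     same = sorted({v for k, v in choices if k == key})
--     rest = [(k, v) for k, v in choices if k != key]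
--     return [(key, v) for v in same] + _compact_choices(rest)
-- ===== Notes on version B (the rewrite author's own statement) =====
-- stated objective: alternative
-- what changed: Replaced the OrderedDict-of-sets grouping pass plus flattening comprehension by a recursive peel: take the first key, emit its sorted distinct values, recurse on the pairs with other keys; no dict is built.
import Mathlib
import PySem

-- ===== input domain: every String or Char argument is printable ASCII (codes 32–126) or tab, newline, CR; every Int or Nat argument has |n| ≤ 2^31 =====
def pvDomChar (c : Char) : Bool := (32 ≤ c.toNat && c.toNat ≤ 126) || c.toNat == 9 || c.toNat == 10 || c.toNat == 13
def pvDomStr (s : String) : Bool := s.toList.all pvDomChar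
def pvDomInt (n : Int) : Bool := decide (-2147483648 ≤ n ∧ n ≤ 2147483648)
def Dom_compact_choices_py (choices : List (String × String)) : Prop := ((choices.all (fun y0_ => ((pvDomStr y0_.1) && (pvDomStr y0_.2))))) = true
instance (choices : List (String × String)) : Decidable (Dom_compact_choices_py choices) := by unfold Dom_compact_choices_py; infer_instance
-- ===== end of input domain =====

-- B replaces the dict-of-sets grouping pass by a recursive peel of one key group at a time (alternative decomposition, same results).

-- ===== PORT A =====
def compact_choices_py (choices : List (String × String)) : List (String × String) :=
  let value_map : PySem.Dict String (PySem.Set String) :=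
    choices.foldl (fun d p =>
      let d := if d.contains p.1 = false then d.insert p.1 PySem.Set.empty else d
      d.insert p.1 (PySem.Set.add (d.getD p.1 PySem.Set.empty) p.2)) PySem.Dict.empty
  value_map.items.flatMap (fun kv =>
    (PySem.List.sorted kv.2 (fun x => x) false).map (fun v => (kv.1, v)))

-- ===== PORT B =====
def compact_choices_py_alt : List (String × String) → List (String × String)
  | [] => []
  | (k, v) :: rest' =>
    let same := PySem.List.sorted
      (PySem.Set.ofList ((((k, v) :: rest').filter (fun p => p.1 == k)).map (fun p => p.2)))
      (fun x => x) false
    let rest := ((k, v) :: rest').filter (fun p => p.1 != k)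
    same.map (fun w => (k, w)) ++ compact_choices_py_alt rest
termination_by choices => choices.length
decreasing_by
  simp only [List.filter_cons, bne_self_eq_false, List.length_cons]
  exact Nat.lt_succ_of_le (List.length_filter_le _ _)

-- ===== PRECONDITION & SPEC =====
def Spec_compact_choices_py (choices : List (String × String)) (out : List (String × String)) : Prop := out = compact_choices_py_alt choices
instance (choices : List (String × String)) (out : List (String × String)) : Decidable (Spec_compact_choices_py choices out) := by unfold Spec_compact_choices_py; infer_instance

-- ===== CLAIM (what is proved, stated in full; the proofs are below) =====
def Claim_equal_compact_choices_py : Prop := ∀ (choices : List (String × String)), Dom_compact_choices_py choices → Spec_compact_choices_py choices (compact_choices_py choices)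

-- ===== LEMMAS AND PROOFS =====

-- the canonical value both ports are proved equal to: for each key in first-appearance
-- order, the sorted distinct values of that key
def pvCanon (choices : List (String × String)) : List (String × String) :=
  (PySem.Set.ofList (choices.map (fun p => p.1))).flatMap (fun k =>
    (PySem.List.sorted
      (PySem.Set.ofList ((choices.filter (fun p => p.1 == k)).map (fun p => p.2)))
      (fun x => x) false).map (fun v => (k, v)))

-- A's loop body, named so the fold lemmas can speak about it
def pvStep (d : PySem.Dict String (PySem.Set String)) (p : String × String) :
    PySem.Dict String (PySem.Set String) :=
  let d := if d.contains p.1 = false then d.insert p.1 PySem.Set.empty else d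
  d.insert p.1 (PySem.Set.add (d.getD p.1 PySem.Set.empty) p.2)

theorem pvStep_keys (d : PySem.Dict String (PySem.Set String)) (p : String × String) :
    (pvStep d p).keys = PySem.Set.add d.keys p.1 := by
  unfold pvStep
  by_cases h : d.contains p.1 = true
  · have hk : p.1 ∈ d.keys := (PySem.Dict.contains_iff_mem_keys d p.1).mp h
    simp only [h, Bool.true_eq_false, if_false]
    rw [PySem.Dict.keys_insert_of_contains d _ h]
    simp [PySem.Set.add, PySem.Set.contains, hk]
  · have h' : d.contains p.1 = false := by simpa using h
    have hk : p.1 ∉ d.keys := fun hm => by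
      simp [(PySem.Dict.contains_iff_mem_keys d p.1).mpr hm] at h'
    simp only [h', reduceIte]
    rw [PySem.Dict.keys_insert_of_contains _ _ (PySem.Dict.contains_insert_self d p.1 _),
        PySem.Dict.keys_insert_of_not_contains d _ h']
    simp [PySem.Set.add, PySem.Set.contains, hk]

theorem pvStep_getD (d : PySem.Dict String (PySem.Set String)) (p : String × String) (c : String) :
    (pvStep d p).getD c PySem.Set.empty
      = if c = p.1 then PySem.Set.add (d.getD p.1 PySem.Set.empty) p.2
        else d.getD c PySem.Set.empty := by
  unfold pvStep
  by_cases h : d.contains p.1 = true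
  · simp only [h, Bool.true_eq_false, if_false]
    rw [PySem.Dict.getD_insert]
  · have h' : d.contains p.1 = false := by simpa using h
    simp only [h', reduceIte]
    rw [PySem.Dict.getD_insert, PySem.Dict.getD_insert,
        PySem.Dict.getD_of_not_contains d _ h']
    by_cases hc : c = p.1 <;> simp [hc, PySem.Dict.getD_insert]

theorem pv_foldl_add_cons {α : Type} [BEq α] [LawfulBEq α] (l : List α) (k : α) (s : List α) :
    List.foldl PySem.Set.add (k :: s) l
      = k :: List.foldl PySem.Set.add s (l.filter (fun x => x != k)) := by
  induction l generalizing s with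
  | nil => simp
  | cons x xs ih =>
    by_cases hxk : x = k
    · subst hxk
      have h1 : PySem.Set.add (x :: s) x = x :: s := by
        simp [PySem.Set.add, PySem.Set.contains]
      simp [ih]
    · have hne : (x != k) = true := by simp [hxk]
      have h2 : PySem.Set.add (k :: s) x = k :: PySem.Set.add s x := by
        simp only [PySem.Set.add, PySem.Set.contains, List.contains_cons]
        have : (x == k) = false := by simp [hxk]
        simp [this]
        split <;> rfl
      simp [hne, h2, ih]

theorem pvA_keys (l : List (String × String)) (d : PySem.Dict String (PySem.Set String)) :
    (l.foldl pvStep d).keys = PySem.Set.update d.keys (l.map (fun p => p.1)) := by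
  induction l generalizing d with
  | nil => simp [PySem.Set.update]
  | cons x xs ih =>
    simp only [List.foldl_cons, List.map_cons, PySem.Set.update] at *
    rw [ih, pvStep_keys]

theorem pvA_getD (l : List (String × String)) (d : PySem.Dict String (PySem.Set String)) (c : String) :
    (l.foldl pvStep d).getD c PySem.Set.empty
      = PySem.Set.update (d.getD c PySem.Set.empty) ((l.filter (fun p => p.1 == c)).map (fun p => p.2)) := by
  induction l generalizing d with
  | nil => simp [PySem.Set.update]
  | cons x xs ih =>
    simp only [List.foldl_cons]
    rw [ih, pvStep_getD]
    by_cases hc : x.1 = c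
    · have h1 : (x.1 == c) = true := by simp [hc]
      simp [hc, PySem.Set.update]
    · have h1 : (x.1 == c) = false := by simp [hc]
      have h2 : ¬ c = x.1 := fun h => hc h.symm
      simp [h1, h2, PySem.Set.update]

theorem pvA_eq_canon (choices : List (String × String)) :
    compact_choices_py choices = pvCanon choices := by
  unfold compact_choices_py pvCanon
  show (choices.foldl pvStep PySem.Dict.empty).items.flatMap _ = _
  set d := choices.foldl pvStep PySem.Dict.empty with hd
  have hkeys : d.keys = PySem.Set.ofList (choices.map (fun p => p.1)) := by
    rw [hd, pvA_keys]
    simp [PySem.Set.update, PySem.Set.ofList_eq_foldl, PySem.Dict.keys_empty]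
  have hnd : d.keys.Nodup := by rw [hkeys]; exact PySem.Set.nodup_ofList _
  rw [PySem.Dict.items_eq_map_keys d hnd PySem.Set.empty, List.flatMap_map, hkeys]
  refine List.flatMap_congr (fun k _ => ?_)
  have : d.getD k PySem.Set.empty
      = PySem.Set.ofList ((choices.filter (fun p => p.1 == k)).map (fun p => p.2)) := by
    rw [hd, pvA_getD]
    simp [PySem.Set.update, PySem.Set.ofList_eq_foldl, PySem.Dict.getD_empty]
  rw [this]

theorem pv_ofList_cons {α : Type} [BEq α] [LawfulBEq α] (k : α) (l : List α) :
    PySem.Set.ofList (k :: l) = k :: PySem.Set.ofList (l.filter (fun x => x != k)) := by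
  rw [PySem.Set.ofList_eq_foldl, PySem.Set.ofList_eq_foldl, List.foldl_cons]
  have : PySem.Set.add ([] : List α) k = [k] := by simp [PySem.Set.add, PySem.Set.contains]
  rw [this, pv_foldl_add_cons]

theorem pvCanon_cons (k v : String) (rest : List (String × String)) :
    pvCanon ((k, v) :: rest)
      = (PySem.List.sorted
          (PySem.Set.ofList ((((k, v) :: rest).filter (fun p => p.1 == k)).map (fun p => p.2)))
          (fun x => x) false).map (fun w => (k, w))
        ++ pvCanon (rest.filter (fun p => p.1 != k)) := by
  unfold pvCanon
  rw [List.map_cons, pv_ofList_cons, List.flatMap_cons]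
  congr 1
  have hkeys : (rest.filter (fun p => p.1 != k)).map (fun p => p.1)
      = (rest.map (fun p => p.1)).filter (fun x => x != k) := by
    rw [List.filter_map]; rfl
  rw [hkeys]
  refine List.flatMap_congr (fun k' hk' => ?_)
  have hne : k' ≠ k := by
    have := (PySem.Set.mem_ofList _ _).mp hk'
    have := List.of_mem_filter this
    simpa using this
  have hfil : ((k, v) :: rest).filter (fun p => p.1 == k')
      = (rest.filter (fun p => p.1 != k)).filter (fun p => p.1 == k') := by
    rw [List.filter_filter, List.filter_cons]
    have hhead : ((k, v).1 == k') = false := by simp; exact fun h => hne h.symm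
    rw [hhead]
    simp only [Bool.false_eq_true, if_false]
    refine List.filter_congr (fun p _ => ?_)
    by_cases hp : p.1 = k'
    · simp [hp, hne]
    · simp [hp]
  rw [hfil]

theorem pvB_eq_canon (choices : List (String × String)) :
    compact_choices_py_alt choices = pvCanon choices := by
  fun_induction compact_choices_py_alt choices with
  | case1 => simp [pvCanon, PySem.Set.ofList_eq_foldl]
  | case2 k v rest' same rest ih =>
    have hrest : rest = rest'.filter (fun p => p.1 != k) := by
      show ((k, v) :: rest').filter (fun p => p.1 != k) = _
      rw [List.filter_cons]; simp
    rw [pvCanon_cons, ih, hrest]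

-- ===== VERDICT (by name: the statement is the Claim_ definition above) =====
theorem compact_choices_py_spec : Claim_equal_compact_choices_py := by
  intro choices _
  unfold Spec_compact_choices_py
  rw [pvA_eq_canon, pvB_eq_canon]
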